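-- pv_equiv track=rewrite | github.com/Toys-R-Us-Rex/Duckify | robot/src/computation.py | _split_into_runs
-- ===== SOURCE A (Python) =====
-- def _split_into_runs(valid_checklist):
--     """
--     Split a list of booleans into runs of consecutive True values.
--
--     For example [True, True, False, True] gives [(0, 1), (3, 3)].
--     Each run is a (start, end) tuple with inclusive indices.
--
--     Parameters
--     ----------
--     valid_checklist : list of bool
--         The validation results for each point.
--
--     Returns
--     -------
--     list of tuple (int, int)
--         Start and end indices of each consecutive valid run.
--     """
--     runs = []
--     start = None
--     for i, is_valid in enumerate(valid_checklist):
--         if is_valid and start is None: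
--             start = i
--         elif not is_valid and start is not None:
--             runs.append((start, i - 1))
--             start = None
--     if start is not None:
--         runs.append((start, len(valid_checklist) - 1))
--     return runs
-- ===== SOURCE B (Python) =====
-- def _split_into_runs(valid_checklist):
--     """Run-skipping scan: jump from run boundary to run boundary (no per-element sentinel)."""
--     runs = []
--     n = len(valid_checklist)
--     i = 0
--     while i < n:
--         j = i + 1
--         while j < n and valid_checklist[j] == valid_checklist[i]:
--             j += 1
--         if valid_checklist[i]:
--             runs.append((i, j - 1))
--         i = j
--     return runs
-- ===== Notes on version B (the rewrite author's own statement) =====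
-- stated objective: alternative
-- what changed: Replaces the per-element start=None sentinel/flush state machine with a run-skipping two-index scan that finds each maximal run's boundary directly and emits (start, end) for True runs.
import Mathlib
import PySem

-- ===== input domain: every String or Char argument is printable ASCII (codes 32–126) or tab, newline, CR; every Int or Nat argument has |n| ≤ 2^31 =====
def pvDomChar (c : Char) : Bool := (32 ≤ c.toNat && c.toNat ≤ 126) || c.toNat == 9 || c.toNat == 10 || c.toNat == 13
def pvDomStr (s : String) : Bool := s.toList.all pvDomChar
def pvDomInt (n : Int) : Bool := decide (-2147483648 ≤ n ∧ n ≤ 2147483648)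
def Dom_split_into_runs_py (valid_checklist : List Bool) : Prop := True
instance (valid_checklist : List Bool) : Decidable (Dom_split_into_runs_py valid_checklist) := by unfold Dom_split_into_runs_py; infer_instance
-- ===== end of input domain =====

-- B replaces A's per-element start=None sentinel state machine by a run-skipping
-- two-index scan (same O(n) cost; the objective is an alternative decomposition).

-- ===== PORT A =====
-- the for-loop over enumerate(valid_checklist), state = (runs, start), i carried explicitly
def loopA : Int → Option Int → List (Int × Int) → List Bool → List (Int × Int) × Option Int
  | _, start, runs, [] => (runs, start)
  | i, start, runs, v :: rest =>
    match start, v with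
    | none, true => loopA (i + 1) (some i) runs rest          -- is_valid and start is None
    | some s, false => loopA (i + 1) none (runs ++ [(s, i - 1)]) rest  -- not is_valid and start is not None
    | _, _ => loopA (i + 1) start runs rest

def split_into_runs_py (valid_checklist : List Bool) : List (Int × Int) :=
  match loopA 0 none [] valid_checklist with
  | (runs, some s) => runs ++ [(s, (valid_checklist.length : Int) - 1)]  -- final flush
  | (runs, none) => runs

-- ===== PORT B =====
-- the inner while loop of Source B: length of the maximal leading run of b, and the remainder
def takeRun (b : Bool) : List Bool → Nat × List Bool
  | [] => (0, [])
  | x :: xs => if x = b then ((takeRun b xs).1 + 1, (takeRun b xs).2) else (0, x :: xs)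

theorem takeRun_length_le (b : Bool) : ∀ xs : List Bool, (takeRun b xs).2.length ≤ xs.length
  | [] => le_refl _
  | x :: xs => by
    simp only [takeRun]
    split
    · exact le_trans (takeRun_length_le b xs) (Nat.le_succ _)
    · exact le_refl _

-- the outer while loop of Source B: i is the current offset, the argument list is the suffix from i
def goB (i : Int) : List Bool → List (Int × Int)
  | [] => []
  | b :: xs =>
    let t := takeRun b xs
    if b then (i, i + (t.1 + 1) - 1) :: goB (i + (t.1 + 1)) t.2
    else goB (i + (t.1 + 1)) t.2
termination_by l => l.length
decreasing_by
  · exact Nat.lt_succ_of_le (takeRun_length_le b xs)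
  · exact Nat.lt_succ_of_le (takeRun_length_le b xs)

def split_into_runs_py_alt (valid_checklist : List Bool) : List (Int × Int) :=
  goB 0 valid_checklist

-- ===== PRECONDITION & SPEC =====
def Spec_split_into_runs_py (valid_checklist : List Bool) (out : List (Int × Int)) : Prop := out = split_into_runs_py_alt valid_checklist
instance (valid_checklist : List Bool) (out : List (Int × Int)) : Decidable (Spec_split_into_runs_py valid_checklist out) := by unfold Spec_split_into_runs_py; infer_instance

-- ===== CLAIM (what is proved, stated in full; the proofs are below) =====
def Claim_equal_split_into_runs_py : Prop := ∀ (valid_checklist : List Bool), Dom_split_into_runs_py valid_checklist → Spec_split_into_runs_py valid_checklist (split_into_runs_py valid_checklist)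

-- ===== LEMMAS AND PROOFS =====

theorem takeRun_spec (b : Bool) : ∀ xs : List Bool,
    xs = List.replicate (takeRun b xs).1 b ++ (takeRun b xs).2 ∧ (takeRun b xs).2.head? ≠ some b
  | [] => by simp [takeRun]
  | x :: xs => by
    obtain ⟨h1, h2⟩ := takeRun_spec b xs
    by_cases h : x = b
    · simp only [takeRun, if_pos h]
      exact ⟨by rw [List.replicate_succ]; simpa [h] using h1, by simpa using h2⟩
    · simp [takeRun, h]

theorem takeRun_replicate (b : Bool) (k : Nat) (rest : List Bool) (h : rest.head? ≠ some b) :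
    takeRun b (List.replicate k b ++ rest) = (k, rest) := by
  induction k with
  | zero =>
    simp only [List.replicate, List.nil_append]
    cases rest with
    | nil => simp [takeRun]
    | cons r rs =>
      have : r ≠ b := by simpa using h
      simp [takeRun, this]
  | succ k ih => simp [List.replicate_succ, takeRun, ih]

-- goB skips a leading false-run, advancing the offset
theorem goB_skip_false (j : Int) (k : Nat) (rest : List Bool) (h : rest.head? ≠ some false) :
    goB j (List.replicate k false ++ rest) = goB (j + k) rest := by
  cases k with
  | zero => simp
  | succ k =>
    rw [List.replicate_succ, List.cons_append, goB]
    rw [takeRun_replicate false k rest h]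
    simp only [Bool.false_eq_true, if_false]
    rw [show (j + ((k : Int) + 1)) = j + ((k + 1 : Nat) : Int) by push_cast; ring]

theorem loopA_trues (k : Nat) : ∀ (i s : Int) (runs : List (Int × Int)) (l : List Bool),
    loopA i (some s) runs (List.replicate k true ++ l) = loopA (i + k) (some s) runs l := by
  induction k with
  | zero => intro i s runs l; simp
  | succ k ih =>
    intro i s runs l
    rw [List.replicate_succ, List.cons_append]
    rw [show loopA i (some s) runs (true :: (List.replicate k true ++ l))
        = loopA (i + 1) (some s) runs (List.replicate k true ++ l) from rfl]
    rw [ih]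
    rw [show (i + 1 + (k : Int)) = i + ((k + 1 : Nat) : Int) by push_cast; ring]

-- flush at end position e, as the Python does after the loop
def finA (e : Int) : List (Int × Int) × Option Int → List (Int × Int)
  | (runs, some s) => runs ++ [(s, e - 1)]
  | (runs, none) => runs

theorem loopA_none_eq_goB : ∀ (n : Nat) (l : List Bool), l.length ≤ n →
    ∀ (i : Int) (runs : List (Int × Int)),
      finA (i + l.length) (loopA i none runs l) = runs ++ goB i l := by
  intro n
  induction n with
  | zero =>
    intro l hl i runs
    have : l = [] := List.eq_nil_of_length_eq_zero (Nat.le_zero.mp hl)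
    subst this
    simp [loopA, finA, goB]
  | succ n ih =>
    intro l hl i runs
    cases l with
    | nil => simp [loopA, finA, goB]
    | cons b xs =>
      have hxslen : xs.length ≤ n := Nat.lt_succ_iff.mp (by simpa using hl)
      cases b with
      | false =>
        -- A: plain continue; B: skip the whole false-run at once
        rcases htr : takeRun false xs with ⟨k, rest⟩
        have hspec := takeRun_spec false xs
        rw [htr] at hspec
        obtain ⟨hx, hh⟩ := hspec
        rw [show loopA i none runs (false :: xs) = loopA (i + 1) none runs xs from rfl]
        rw [show (i + ((false :: xs).length : Int)) = (i + 1) + xs.length by simp; ring]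
        rw [ih xs hxslen (i + 1) runs]
        simp only [goB, htr, if_neg (by simp : ¬ (false = true))]
        rw [show xs = List.replicate k false ++ rest from hx,
            goB_skip_false (i + 1) k rest hh]
        congr 2
        ring
      | true =>
        rcases htr : takeRun true xs with ⟨k, rest⟩
        have hspec := takeRun_spec true xs
        rw [htr] at hspec
        obtain ⟨hx, hh⟩ := hspec
        have hrestlen : rest.length ≤ xs.length := by
          have := takeRun_length_le true xs
          rwa [htr] at this
        simp only [goB, htr]
        have hlen : ((true :: xs).length : Int) = (k + 1) + rest.length := by
          rw [hx]; simp; ring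
        rw [hlen]
        rw [show loopA i none runs (true :: xs) = loopA (i + 1) (some i) runs xs from rfl,
            show xs = List.replicate k true ++ rest from hx, loopA_trues]
        cases rest with
        | nil =>
          -- the True-run reaches the end: A's final flush is B's last pair
          rw [show loopA (i + 1 + (k : Int)) (some i) runs [] = (runs, some i) from rfl]
          simp only [finA, goB, List.length_nil, Nat.cast_zero, if_true]
          norm_num
        | cons r rest' =>
          have hrfalse : r = false := by
            cases r
            · rfl
            · exact absurd rfl hh
          subst hrfalse
          rw [show loopA (i + 1 + (k : Int)) (some i) runs (false :: rest')
              = loopA (i + 1 + k + 1) none (runs ++ [(i, i + 1 + k - 1)]) rest' from rfl]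
          have hrest'len : rest'.length ≤ n :=
            le_trans (le_trans (Nat.le_succ _) hrestlen) hxslen
          rw [show (i + (((k : Int) + 1) + ((false :: rest').length : Int)))
              = (i + 1 + k + 1) + rest'.length by simp; ring]
          rw [ih rest' hrest'len (i + 1 + k + 1) (runs ++ [(i, i + 1 + k - 1)])]
          -- B side: unfold the false-run at the head of rest'
          rcases htr2 : takeRun false rest' with ⟨k2, rest2⟩
          have hspec2 := takeRun_spec false rest'
          rw [htr2] at hspec2
          obtain ⟨hx', hh'⟩ := hspec2
          simp only [goB, htr2, if_neg (by simp : ¬ (false = true))]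
          rw [show rest' = List.replicate k2 false ++ rest2 from hx',
              goB_skip_false (i + 1 + k + 1) k2 rest2 hh']
          rw [show (i + 1 + (k : Int) + 1 + k2) = i + ((k : Int) + 1) + ((k2 : Int) + 1) by ring,
              show (i + 1 + (k : Int) - 1) = i + ((k : Int) + 1) - 1 by ring]
          simp

-- ===== VERDICT (by name: the statement is the Claim_ definition above) =====
theorem split_into_runs_py_spec : Claim_equal_split_into_runs_py := by
  intro l _
  unfold Spec_split_into_runs_py split_into_runs_py split_into_runs_py_alt
  have h := loopA_none_eq_goB l.length l (le_refl _) 0 []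
  simp only [List.nil_append, zero_add] at h
  rw [← h]
  cases hs : loopA 0 none [] l with
  | mk runs st =>
    cases st <;> simp [finA]
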